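-- pv_equiv track=rewrite | github.com/fateddie/asksharon_ai_blueprint | assistant/modules/fitness/workout_generator.py | _determine_training_focus
-- ===== SOURCE A (Python) =====
-- from typing import Optional, Dict, Any, List
--
-- def _determine_training_focus(goals: List[Dict]) -> str:
--     """Determine primary training focus from active goals."""
--     if not goals:
--         return "balanced"
--
--     # Check goal categories
--     categories = [g.get("goal_category") for g in goals if g.get("goal_category")]
--
--     if "vertical_jump" in categories or "sport_performance" in categories:
--         return "power"
--     elif "strength" in categories:
--         return "strength"
--     elif "muscle_building" in categories:
--         return "hypertrophy"
--     elif "5k_time" in categories or "weight_loss" in categories: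
--         return "endurance"
--     else:
--         return "balanced"
-- ===== SOURCE B (Python) =====
-- _FOCUS_TABLE = {
--     "vertical_jump": (0, "power"),
--     "sport_performance": (0, "power"),
--     "strength": (1, "strength"),
--     "muscle_building": (2, "hypertrophy"),
--     "5k_time": (3, "endurance"),
--     "weight_loss": (3, "endurance"),
-- }
--
--
-- def _determine_training_focus(goals):
--     """Single pass keeping the mapped focus of smallest priority."""
--     best = None
--     for g in goals:
--         entry = _FOCUS_TABLE.get(g.get("goal_category"))
--         if entry is not None and (best is None or entry[0] < best[0]):
--             best = entry
--     return best[1] if best is not None else "balanced"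
-- ===== Notes on version B (the rewrite author's own statement) =====
-- stated objective: idiomatic
-- what changed: Replaced the build-a-categories-list-then-five-membership-scans cascade by a priority table and a single min-reduction pass over the goals keeping the entry with the smallest priority.
import Mathlib
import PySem

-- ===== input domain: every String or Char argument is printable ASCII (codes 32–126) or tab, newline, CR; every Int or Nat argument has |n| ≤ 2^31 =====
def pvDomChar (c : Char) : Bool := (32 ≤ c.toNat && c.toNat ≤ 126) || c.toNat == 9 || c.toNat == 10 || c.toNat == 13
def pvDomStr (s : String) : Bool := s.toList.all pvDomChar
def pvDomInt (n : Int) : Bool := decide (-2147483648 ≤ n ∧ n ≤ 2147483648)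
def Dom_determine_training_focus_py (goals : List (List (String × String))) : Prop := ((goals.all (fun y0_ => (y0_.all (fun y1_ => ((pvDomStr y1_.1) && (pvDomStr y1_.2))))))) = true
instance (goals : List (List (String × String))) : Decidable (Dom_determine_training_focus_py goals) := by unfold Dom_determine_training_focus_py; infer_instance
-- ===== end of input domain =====

-- B replaces A's categories-list + five membership-scan cascade by a priority table and one
-- min-reduction pass over the goals (objective: idiomatic; return value only, no mutation).

-- ===== PORT A =====
-- g.get("goal_category"): first match in the assoc list (Python dict lookup), None if absent
def pvGetCat (g : List (String × String)) : Option String :=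
  (g.find? (fun p => p.1 == "goal_category")).map (·.2)

def determine_training_focus_py (goals : List (List (String × String))) : String :=
  if goals = [] then "balanced"
  else
    let categories := goals.filterMap (fun g =>
      match pvGetCat g with
      | some s => if s ≠ "" then some s else none
      | none => none)
    if categories.contains "vertical_jump" || categories.contains "sport_performance" then "power"
    else if categories.contains "strength" then "strength"
    else if categories.contains "muscle_building" then "hypertrophy"
    else if categories.contains "5k_time" || categories.contains "weight_loss" then "endurance"
    else "balanced"

-- ===== PORT B =====
def pvFocusTable : List (String × (Nat × String)) :=
  [("vertical_jump", (0, "power")), ("sport_performance", (0, "power")),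
   ("strength", (1, "strength")), ("muscle_building", (2, "hypertrophy")),
   ("5k_time", (3, "endurance")), ("weight_loss", (3, "endurance"))]

-- _FOCUS_TABLE.get(cat): first match in the table, None for None/unknown category
def pvTbl (c : Option String) : Option (Nat × String) :=
  match c with
  | none => none
  | some s => (pvFocusTable.find? (fun p => p.1 == s)).map (·.2)

def determine_training_focus_py_alt (goals : List (List (String × String))) : String :=
  let best := goals.foldl (fun best g =>
    match pvTbl (pvGetCat g) with
    | none => best
    | some entry =>
      match best with
      | none => some entry
      | some b => if entry.1 < b.1 then some entry else best) none
  match best with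
  | some b => b.2
  | none => "balanced"

-- ===== PRECONDITION & SPEC =====
def Spec_determine_training_focus_py (goals : List (List (String × String))) (out : String) : Prop := out = determine_training_focus_py_alt goals
instance (goals : List (List (String × String))) (out : String) : Decidable (Spec_determine_training_focus_py goals out) := by unfold Spec_determine_training_focus_py; infer_instance

-- ===== CLAIM (what is proved, stated in full; the proofs are below) =====
def Claim_equal_determine_training_focus_py : Prop := ∀ (goals : List (List (String × String))), Dom_determine_training_focus_py goals → Spec_determine_training_focus_py goals (determine_training_focus_py goals)

-- ===== LEMMAS AND PROOFS =====

-- min-with-left-bias on optional (priority, focus) entries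
def pvMerge (a b : Option (Nat × String)) : Option (Nat × String) :=
  match a, b with
  | none, y => y
  | some x, none => some x
  | some x, some y => if y.1 < x.1 then some y else some x

def pvStep (acc : Option (Nat × String)) (c : String) : Option (Nat × String) :=
  pvMerge acc (pvTbl (some c))

-- the categories list A builds
def pvCats (goals : List (List (String × String))) : List String :=
  goals.filterMap (fun g =>
    match pvGetCat g with
    | some s => if s ≠ "" then some s else none
    | none => none)

-- the min-priority entry as a function of membership in the categories list
def pvG (cats : List String) : Option (Nat × String) :=
  if cats.contains "vertical_jump" || cats.contains "sport_performance" then some (0, "power")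
  else if cats.contains "strength" then some (1, "strength")
  else if cats.contains "muscle_building" then some (2, "hypertrophy")
  else if cats.contains "5k_time" || cats.contains "weight_loss" then some (3, "endurance")
  else none

def pvRender (o : Option (Nat × String)) : String :=
  match o with
  | some b => b.2
  | none => "balanced"

theorem pvMerge_assoc (a b c : Option (Nat × String)) :
    pvMerge (pvMerge a b) c = pvMerge a (pvMerge b c) := by
  rcases a with _ | a <;> rcases b with _ | b <;> rcases c with _ | c <;> try rfl
  · simp only [pvMerge]; split_ifs <;> rfl
  · by_cases h1 : b.1 < a.1 <;> by_cases h2 : c.1 < b.1 <;> by_cases h3 : c.1 < a.1 <;>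
      simp [pvMerge, h1, h2, h3] <;> omega

theorem pvTbl_of_ne (s : String)
    (h1 : s ≠ "vertical_jump") (h2 : s ≠ "sport_performance") (h3 : s ≠ "strength")
    (h4 : s ≠ "muscle_building") (h5 : s ≠ "5k_time") (h6 : s ≠ "weight_loss") :
    pvTbl (some s) = none := by
  have e1 : ("vertical_jump" == s) = false := by simp [Ne.symm h1]
  have e2 : ("sport_performance" == s) = false := by simp [Ne.symm h2]
  have e3 : ("strength" == s) = false := by simp [Ne.symm h3]
  have e4 : ("muscle_building" == s) = false := by simp [Ne.symm h4]
  have e5 : ("5k_time" == s) = false := by simp [Ne.symm h5]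
  have e6 : ("weight_loss" == s) = false := by simp [Ne.symm h6]
  simp [pvTbl, pvFocusTable, List.find?, e1, e2, e3, e4, e5, e6]

theorem pvG_cons (c : String) (cs : List String) :
    pvG (c :: cs) = pvMerge (pvTbl (some c)) (pvG cs) := by
  by_cases h1 : c = "vertical_jump"
  · subst h1; simp [pvG, pvTbl, pvFocusTable, pvMerge]; split_ifs <;> simp_all
  by_cases h2 : c = "sport_performance"
  · subst h2; simp [pvG, pvTbl, pvFocusTable, pvMerge]; split_ifs <;> simp_all
  by_cases h3 : c = "strength"
  · subst h3; simp [pvG, pvTbl, pvFocusTable, pvMerge]; split_ifs <;> simp_all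
  by_cases h4 : c = "muscle_building"
  · subst h4; simp [pvG, pvTbl, pvFocusTable, pvMerge]; split_ifs <;> simp_all
  by_cases h5 : c = "5k_time"
  · subst h5; simp [pvG, pvTbl, pvFocusTable, pvMerge]; split_ifs <;> simp_all
  by_cases h6 : c = "weight_loss"
  · subst h6; simp [pvG, pvTbl, pvFocusTable, pvMerge]; split_ifs <;> simp_all
  · rw [pvTbl_of_ne c h1 h2 h3 h4 h5 h6]
    have n1 : ¬("vertical_jump" = c) := fun e => h1 e.symm
    have n2 : ¬("sport_performance" = c) := fun e => h2 e.symm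
    have n3 : ¬("strength" = c) := fun e => h3 e.symm
    have n4 : ¬("muscle_building" = c) := fun e => h4 e.symm
    have n5 : ¬("5k_time" = c) := fun e => h5 e.symm
    have n6 : ¬("weight_loss" = c) := fun e => h6 e.symm
    simp [pvG, pvMerge, n1, n2, n3, n4, n5, n6]

theorem pvFoldl_step (cats : List String) (acc : Option (Nat × String)) :
    cats.foldl pvStep acc = pvMerge acc (pvG cats) := by
  induction cats generalizing acc with
  | nil => cases acc <;> rfl
  | cons c cs ih =>
    rw [List.foldl_cons, ih, pvG_cons, ← pvMerge_assoc]
    rfl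

-- B's fold over goals equals the fold of pvStep over A's categories list
theorem pvAlt_fold_eq (goals : List (List (String × String))) (acc : Option (Nat × String)) :
    goals.foldl (fun best g =>
      match pvTbl (pvGetCat g) with
      | none => best
      | some entry =>
        match best with
        | none => some entry
        | some b => if entry.1 < b.1 then some entry else best) acc
    = (pvCats goals).foldl pvStep acc := by
  induction goals generalizing acc with
  | nil => rfl
  | cons g gs ih =>
    rw [List.foldl_cons, ih]
    rcases h : pvGetCat g with _ | s
    · simp [pvCats, h, pvTbl]
    · by_cases hs : s = ""
      · subst hs
        have ht : pvTbl (some "") = none := by decide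
        simp [pvCats, h, ht]
      · have hc : pvCats (g :: gs) = s :: pvCats gs := by simp [pvCats, h, hs]
        rw [hc, List.foldl_cons]
        rcases ht : pvTbl (some s) with _ | e <;>
          cases acc <;> simp [pvStep, pvMerge, ht]

theorem pvRender_pvG (cats : List String) :
    pvRender (pvG cats) =
      (if cats.contains "vertical_jump" || cats.contains "sport_performance" then "power"
       else if cats.contains "strength" then "strength"
       else if cats.contains "muscle_building" then "hypertrophy"
       else if cats.contains "5k_time" || cats.contains "weight_loss" then "endurance"
       else "balanced") := by
  unfold pvG
  split_ifs <;> rfl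

theorem pvSpec_aux (goals : List (List (String × String))) :
    determine_training_focus_py goals = determine_training_focus_py_alt goals := by
  show _ = pvRender (goals.foldl _ none)
  rw [pvAlt_fold_eq, pvFoldl_step]
  have hm : pvMerge none (pvG (pvCats goals)) = pvG (pvCats goals) := rfl
  rw [hm]
  by_cases hg : goals = []
  · subst hg; rfl
  · unfold determine_training_focus_py
    rw [if_neg hg]
    exact (pvRender_pvG (pvCats goals)).symm

-- ===== VERDICT (by name: the statement is the Claim_ definition above) =====
theorem determine_training_focus_py_spec : Claim_equal_determine_training_focus_py := by
  intro goals _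
  unfold Spec_determine_training_focus_py
  exact pvSpec_aux goals
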